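-- pv_equiv track=rewrite | github.com/moleece/aoc_23 | 2024/michael/21/solution.py | numsToArrows
-- ===== SOURCE A (Python) =====
-- def numsToArrows(numString):
--     numPos = {
--         '7': (0,0),
--         '8': (0,1),
--         '9': (0,2),
--         '4': (1,0),
--         '5': (1,1),
--         '6': (1,2),
--         '1': (2,0),
--         '2': (2,1),
--         '3': (2,2),
--         '0': (3,1),
--         'A': (3,2)
--     }
--
--     pos = (3,2)
--     seq = ''
--     for num in numString:
--         newPos = numPos[num]
--         dy = newPos[0] - pos[0]
--         dx = newPos[1] - pos[1]
--         toAdd = []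
--         if pos[0] == 3 and newPos[1] == 0:
--             sortOrder = '^v<>'
--         else:
--             sortOrder = '<>^v'
--         if dx > 0:
--             toAdd += ['>'] * dx
--         else:
--             toAdd += ['<'] * -dx
--         if dy > 0:
--             toAdd += ['v'] * dy
--         else:
--             toAdd += ['^'] * -dy
--         toAdd = sorted(toAdd, key=lambda x: sortOrder.index(x))
--         seq += ''.join(toAdd)
--         seq += 'A'
--         pos = newPos
--     return seq
-- ===== SOURCE B (Python) =====
-- # Precomputed lookup table: arrow string for every ordered pair of keypad keys.
-- _TABLE = {
--     ('7', '7'): '', ('7', '8'): '>', ('7', '9'): '>>', ('7', '4'): 'v', ('7', '5'): '>v', ('7', '6'): '>>v', ('7', '1'): 'vv', ('7', '2'): '>vv', ('7', '3'): '>>vv', ('7', '0'): '>vvv', ('7', 'A'): '>>vvv',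
--     ('8', '7'): '<', ('8', '8'): '', ('8', '9'): '>', ('8', '4'): '<v', ('8', '5'): 'v', ('8', '6'): '>v', ('8', '1'): '<vv', ('8', '2'): 'vv', ('8', '3'): '>vv', ('8', '0'): 'vvv', ('8', 'A'): '>vvv',
--     ('9', '7'): '<<', ('9', '8'): '<', ('9', '9'): '', ('9', '4'): '<<v', ('9', '5'): '<v', ('9', '6'): 'v', ('9', '1'): '<<vv', ('9', '2'): '<vv', ('9', '3'): 'vv', ('9', '0'): '<vvv', ('9', 'A'): 'vvv',
--     ('4', '7'): '^', ('4', '8'): '>^', ('4', '9'): '>>^', ('4', '4'): '', ('4', '5'): '>', ('4', '6'): '>>', ('4', '1'): 'v', ('4', '2'): '>v', ('4', '3'): '>>v', ('4', '0'): '>vv', ('4', 'A'): '>>vv',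
--     ('5', '7'): '<^', ('5', '8'): '^', ('5', '9'): '>^', ('5', '4'): '<', ('5', '5'): '', ('5', '6'): '>', ('5', '1'): '<v', ('5', '2'): 'v', ('5', '3'): '>v', ('5', '0'): 'vv', ('5', 'A'): '>vv',
--     ('6', '7'): '<<^', ('6', '8'): '<^', ('6', '9'): '^', ('6', '4'): '<<', ('6', '5'): '<', ('6', '6'): '', ('6', '1'): '<<v', ('6', '2'): '<v', ('6', '3'): 'v', ('6', '0'): '<vv', ('6', 'A'): 'vv',
--     ('1', '7'): '^^', ('1', '8'): '>^^', ('1', '9'): '>>^^', ('1', '4'): '^', ('1', '5'): '>^', ('1', '6'): '>>^', ('1', '1'): '', ('1', '2'): '>', ('1', '3'): '>>', ('1', '0'): '>v', ('1', 'A'): '>>v',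
--     ('2', '7'): '<^^', ('2', '8'): '^^', ('2', '9'): '>^^', ('2', '4'): '<^', ('2', '5'): '^', ('2', '6'): '>^', ('2', '1'): '<', ('2', '2'): '', ('2', '3'): '>', ('2', '0'): 'v', ('2', 'A'): '>v',
--     ('3', '7'): '<<^^', ('3', '8'): '<^^', ('3', '9'): '^^', ('3', '4'): '<<^', ('3', '5'): '<^', ('3', '6'): '^', ('3', '1'): '<<', ('3', '2'): '<', ('3', '3'): '', ('3', '0'): '<v', ('3', 'A'): 'v',
--     ('0', '7'): '^^^<', ('0', '8'): '^^^', ('0', '9'): '>^^^', ('0', '4'): '^^<', ('0', '5'): '^^', ('0', '6'): '>^^', ('0', '1'): '^<', ('0', '2'): '^', ('0', '3'): '>^', ('0', '0'): '', ('0', 'A'): '>',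
--     ('A', '7'): '^^^<<', ('A', '8'): '<^^^', ('A', '9'): '^^^', ('A', '4'): '^^<<', ('A', '5'): '<^^', ('A', '6'): '^^', ('A', '1'): '^<<', ('A', '2'): '<^', ('A', '3'): '^', ('A', '0'): '<', ('A', 'A'): '',
-- }
--
--
-- def numsToArrows(numString):
--     src = 'A' + numString
--     return ''.join(_TABLE[(p, q)] + 'A' for p, q in zip(src, numString))
-- ===== Notes on version B (the rewrite author's own statement) =====
-- stated objective: alternative
-- what changed: Replaced A's stateful loop (running position, per-character delta arithmetic and a sorted() call) with a pure data-driven lookup: a precomputed 121-entry table mapping each ordered pair of keypad keys to its arrow string, applied pairwise over the sequence with the start key prepended, via zip and join.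
import Mathlib
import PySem

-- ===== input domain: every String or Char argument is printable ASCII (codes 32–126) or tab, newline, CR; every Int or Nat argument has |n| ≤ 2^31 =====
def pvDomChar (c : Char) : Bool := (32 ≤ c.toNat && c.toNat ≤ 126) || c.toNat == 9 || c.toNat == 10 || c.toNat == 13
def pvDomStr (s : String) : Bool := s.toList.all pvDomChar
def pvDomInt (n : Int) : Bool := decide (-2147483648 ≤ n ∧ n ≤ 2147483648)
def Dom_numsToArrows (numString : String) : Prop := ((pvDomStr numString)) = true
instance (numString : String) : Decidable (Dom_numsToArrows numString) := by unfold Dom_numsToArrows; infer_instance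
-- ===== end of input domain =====

-- B replaces A's stateful delta-and-sort loop by a pure lookup: a precomputed 121-entry
-- table (pair of keys -> arrow string), applied pairwise over 'A' + numString.

-- ===== PORT A =====
def pvNumPos : PySem.Dict Char (Int × Int) :=
  PySem.Dict.ofList [('7',(0,0)),('8',(0,1)),('9',(0,2)),('4',(1,0)),('5',(1,1)),
                     ('6',(1,2)),('1',(2,0)),('2',(2,1)),('3',(2,2)),('0',(3,1)),('A',(3,2))]

-- one iteration of A's loop; a missing key is a Python KeyError, excluded by Pre_ (default never used there)
def pvStepA (st : (Int × Int) × List Char) (num : Char) : (Int × Int) × List Char :=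
  let pos := st.1
  let newPos := pvNumPos.getD num (3,2)
  let dy := newPos.1 - pos.1
  let dx := newPos.2 - pos.2
  let toAdd : List Char :=
    (if dx > 0 then List.replicate dx.toNat '>' else List.replicate (-dx).toNat '<')
    ++ (if dy > 0 then List.replicate dy.toNat 'v' else List.replicate (-dy).toNat '^')
  let sortOrder : String := if pos.1 = 3 ∧ newPos.2 = 0 then "^v<>" else "<>^v"
  let sortedAdd := PySem.List.sorted toAdd (fun x => PySem.Str.find sortOrder (String.ofList [x]))
  (newPos, st.2 ++ sortedAdd ++ ['A'])

def numsToArrows (numString : String) : String :=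
  String.ofList (numString.toList.foldl pvStepA ((3,2), [])).2

-- ===== PORT B =====
-- Source B's literal precomputed table
def pvTable : PySem.Dict (Char × Char) String :=
  PySem.Dict.ofList [
    (('7','7'), ""), (('7','8'), ">"), (('7','9'), ">>"), (('7','4'), "v"), (('7','5'), ">v"), (('7','6'), ">>v"), (('7','1'), "vv"), (('7','2'), ">vv"), (('7','3'), ">>vv"), (('7','0'), ">vvv"), (('7','A'), ">>vvv"),
    (('8','7'), "<"), (('8','8'), ""), (('8','9'), ">"), (('8','4'), "<v"), (('8','5'), "v"), (('8','6'), ">v"), (('8','1'), "<vv"), (('8','2'), "vv"), (('8','3'), ">vv"), (('8','0'), "vvv"), (('8','A'), ">vvv"),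
    (('9','7'), "<<"), (('9','8'), "<"), (('9','9'), ""), (('9','4'), "<<v"), (('9','5'), "<v"), (('9','6'), "v"), (('9','1'), "<<vv"), (('9','2'), "<vv"), (('9','3'), "vv"), (('9','0'), "<vvv"), (('9','A'), "vvv"),
    (('4','7'), "^"), (('4','8'), ">^"), (('4','9'), ">>^"), (('4','4'), ""), (('4','5'), ">"), (('4','6'), ">>"), (('4','1'), "v"), (('4','2'), ">v"), (('4','3'), ">>v"), (('4','0'), ">vv"), (('4','A'), ">>vv"),
    (('5','7'), "<^"), (('5','8'), "^"), (('5','9'), ">^"), (('5','4'), "<"), (('5','5'), ""), (('5','6'), ">"), (('5','1'), "<v"), (('5','2'), "v"), (('5','3'), ">v"), (('5','0'), "vv"), (('5','A'), ">vv"),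
    (('6','7'), "<<^"), (('6','8'), "<^"), (('6','9'), "^"), (('6','4'), "<<"), (('6','5'), "<"), (('6','6'), ""), (('6','1'), "<<v"), (('6','2'), "<v"), (('6','3'), "v"), (('6','0'), "<vv"), (('6','A'), "vv"),
    (('1','7'), "^^"), (('1','8'), ">^^"), (('1','9'), ">>^^"), (('1','4'), "^"), (('1','5'), ">^"), (('1','6'), ">>^"), (('1','1'), ""), (('1','2'), ">"), (('1','3'), ">>"), (('1','0'), ">v"), (('1','A'), ">>v"),
    (('2','7'), "<^^"), (('2','8'), "^^"), (('2','9'), ">^^"), (('2','4'), "<^"), (('2','5'), "^"), (('2','6'), ">^"), (('2','1'), "<"), (('2','2'), ""), (('2','3'), ">"), (('2','0'), "v"), (('2','A'), ">v"),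
    (('3','7'), "<<^^"), (('3','8'), "<^^"), (('3','9'), "^^"), (('3','4'), "<<^"), (('3','5'), "<^"), (('3','6'), "^"), (('3','1'), "<<"), (('3','2'), "<"), (('3','3'), ""), (('3','0'), "<v"), (('3','A'), "v"),
    (('0','7'), "^^^<"), (('0','8'), "^^^"), (('0','9'), ">^^^"), (('0','4'), "^^<"), (('0','5'), "^^"), (('0','6'), ">^^"), (('0','1'), "^<"), (('0','2'), "^"), (('0','3'), ">^"), (('0','0'), ""), (('0','A'), ">"),
    (('A','7'), "^^^<<"), (('A','8'), "<^^^"), (('A','9'), "^^^"), (('A','4'), "^^<<"), (('A','5'), "<^^"), (('A','6'), "^^"), (('A','1'), "^<<"), (('A','2'), "<^"), (('A','3'), "^"), (('A','0'), "<"), (('A','A'), "")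
  ]

-- _TABLE[(p,q)]; a missing key is a KeyError, excluded by Pre_
def numsToArrows_alt (numString : String) : String :=
  let src := 'A' :: numString.toList
  String.ofList ((src.zip numString.toList).flatMap
    (fun pq => (pvTable.getD pq "").toList ++ ['A']))

-- ===== PRECONDITION & SPEC =====
def pvKeys : List Char := ['7','8','9','4','5','6','1','2','3','0','A']

-- Pre_ excludes exactly the inputs where A raises KeyError: characters outside the 11 keypad keys
def Pre_numsToArrows (numString : String) : Prop := (numString.toList.all (fun c => pvKeys.contains c)) = true
instance (numString : String) : Decidable (Pre_numsToArrows numString) := by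
  unfold Pre_numsToArrows; infer_instance

def pvWitness_numsToArrows : String := "029A"

def Spec_numsToArrows (numString : String) (out : String) : Prop := out = numsToArrows_alt numString
instance (numString : String) (out : String) : Decidable (Spec_numsToArrows numString out) := by
  unfold Spec_numsToArrows; infer_instance

-- ===== CLAIM (what is proved, stated in full; the proofs are below) =====
def Claim_equal_numsToArrows : Prop := ∀ (numString : String), Dom_numsToArrows numString → Pre_numsToArrows numString → Spec_numsToArrows numString (numsToArrows numString)

-- ===== LEMMAS AND PROOFS =====

-- position of a keypad key, used only to state the loop invariant
def pvPosOf (c : Char) : Int × Int := pvNumPos.getD c (3,2)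

-- A's step only appends to the accumulated sequence
lemma pvStepA_acc (p : Int × Int) (acc : List Char) (c : Char) :
    pvStepA (p, acc) c = ((pvStepA (p, []) c).1, acc ++ (pvStepA (p, []) c).2) := by
  simp [pvStepA]

-- for keypad characters, one A-step from key c1's position emits exactly B's table entry
set_option maxRecDepth 100000 in
set_option maxHeartbeats 2000000 in
lemma pvStep_move : ∀ c1 ∈ pvKeys, ∀ c2 ∈ pvKeys,
    pvStepA (pvPosOf c1, []) c2 = (pvPosOf c2, (pvTable.getD (c1, c2) "").toList ++ ['A']) := by
  intro c1 h1 c2 h2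
  fin_cases h1 <;> fin_cases h2 <;> decide

lemma pvFold_eq : ∀ (l : List Char) (c1 : Char) (acc : List Char),
    c1 ∈ pvKeys → (∀ c ∈ l, c ∈ pvKeys) →
    (l.foldl pvStepA (pvPosOf c1, acc)).2
      = acc ++ ((c1 :: l).zip l).flatMap (fun pq => (pvTable.getD pq "").toList ++ ['A']) := by
  intro l
  induction l with
  | nil => intro c1 acc _ _; simp
  | cons c2 t ih =>
    intro c1 acc h1 hall
    have h2 : c2 ∈ pvKeys := hall c2 (by simp)
    have ht : ∀ c ∈ t, c ∈ pvKeys := fun c hc => hall c (by simp [hc])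
    have : pvStepA (pvPosOf c1, acc) c2
        = (pvPosOf c2, acc ++ ((pvTable.getD (c1, c2) "").toList ++ ['A'])) := by
      rw [pvStepA_acc, pvStep_move c1 h1 c2 h2]
    simp only [List.foldl_cons, this, ih c2 _ h2 ht,
      List.zip_cons_cons, List.flatMap_cons, List.append_assoc]

-- ===== VERDICT (by name: the statement is the Claim_ definition above) =====
theorem numsToArrows_spec : Claim_equal_numsToArrows := by
  intro s _ hpre
  have hpre' : ∀ c ∈ s.toList, c ∈ pvKeys := by
    intro c hc
    simpa using List.all_eq_true.mp hpre c hc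
  unfold Spec_numsToArrows numsToArrows numsToArrows_alt
  have hA : ('A' : Char) ∈ pvKeys := by decide
  have hpos : ((3 : Int), (2 : Int)) = pvPosOf 'A' := by decide
  rw [hpos, pvFold_eq s.toList 'A' [] hA hpre']
  simp
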